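-- pv_equiv track=rewrite | github.com/Cronos87/meilisearch-cuillere-argent-index-indexer | main.py | clean_recipe
-- ===== SOURCE A (Python) =====
-- def clean_recipe(recipe: str) -> str:
--     """
--     Remove unwanted characters in recipes
--     or correct words no well read.
--
--     Params:
--         recipe: Recipe string to clean.
--     """
--     to_correct = {
--         "|": "",
--         "pates": "pâtes",
--         "PATES": "PÂTES"
--     }
--
--     for old, new in to_correct.items():
--         recipe = recipe.replace(old, new)
--
--     return recipe
-- ===== SOURCE B (Python) =====
-- def clean_recipe(recipe: str) -> str:
--     """
--     Remove unwanted characters in recipes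
--     or correct words no well read.
--
--     One pass to drop '|', then one left-to-right scan fixing both
--     misread words at once, instead of three full .replace passes.
--     """
--     s = ''.join(ch for ch in recipe if ch != '|')
--     out = []
--     i = 0
--     n = len(s)
--     while i < n:
--         chunk = s[i:i + 5]
--         if chunk == "pates":
--             out.append("pâtes")
--             i += 5
--         elif chunk == "PATES":
--             out.append("PÂTES")
--             i += 5
--         else:
--             out.append(s[i])
--             i += 1
--     return ''.join(out)
-- ===== Notes on version B (the rewrite author's own statement) =====
-- stated objective: alternative
-- what changed: Instead of three sequential full-string .replace passes driven by a dict loop, B makes one pass dropping the unwanted bar character and then a single left-to-right scan that fixes both misread words at once via a 5-char window comparison.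
import Mathlib
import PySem

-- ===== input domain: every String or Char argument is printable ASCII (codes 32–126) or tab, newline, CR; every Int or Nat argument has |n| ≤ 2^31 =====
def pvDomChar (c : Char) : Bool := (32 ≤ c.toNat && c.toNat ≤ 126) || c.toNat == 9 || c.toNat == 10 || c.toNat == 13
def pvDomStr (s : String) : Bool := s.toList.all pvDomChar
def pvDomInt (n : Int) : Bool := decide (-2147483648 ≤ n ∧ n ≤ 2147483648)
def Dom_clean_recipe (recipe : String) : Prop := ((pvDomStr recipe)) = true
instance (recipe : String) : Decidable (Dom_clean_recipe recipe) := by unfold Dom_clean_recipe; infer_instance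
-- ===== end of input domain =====

-- B replaces A's dict-driven triple of full-string .replace passes by one '|'-dropping
-- filter pass followed by a single left-to-right scan fixing both misread words (alternative objective, same cost).


-- ===== PORT A =====
-- A: build the correction dict, then loop over its items applying str.replace in turn.
def clean_recipe (recipe : String) : String :=
  let to_correct : PySem.Dict String String :=
    ((PySem.Dict.empty.insert "|" "").insert "pates" "pâtes").insert "PATES" "PÂTES"
  to_correct.items.foldl (fun r p => PySem.Str.replace r p.1 p.2) recipe

-- ===== PORT B =====
-- B's scan loop (Source B's while loop): 5-char window comparison at each position.
def cleanScanB : List Char → List Char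
  | [] => []
  | c :: t =>
    if List.isPrefixOf ['p', 'a', 't', 'e', 's'] (c :: t) then
      'p' :: 'â' :: 't' :: 'e' :: 's' :: cleanScanB (List.drop 4 t)
    else if List.isPrefixOf ['P', 'A', 'T', 'E', 'S'] (c :: t) then
      'P' :: 'Â' :: 'T' :: 'E' :: 'S' :: cleanScanB (List.drop 4 t)
    else
      c :: cleanScanB t
termination_by l => l.length
decreasing_by
  all_goals simp <;> omega

-- B: drop '|' in one pass, then one scan replacing both words at once.
def clean_recipe_alt (recipe : String) : String :=
  String.ofList (cleanScanB (recipe.toList.filter (fun c => c != '|')))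

-- ===== PRECONDITION & SPEC =====
def Spec_clean_recipe (recipe : String) (out : String) : Prop := out = clean_recipe_alt recipe
instance (recipe : String) (out : String) : Decidable (Spec_clean_recipe recipe out) := by unfold Spec_clean_recipe; infer_instance

-- ===== CLAIM (what is proved, stated in full; the proofs are below) =====
def Claim_equal_clean_recipe : Prop := ∀ (recipe : String), Dom_clean_recipe recipe → Spec_clean_recipe recipe (clean_recipe recipe)

-- ===== LEMMAS AND PROOFS =====

theorem go_acc (old new : List Char) :
    ∀ (fuel : Nat) (l acc : List Char),
      PySem.Chars.replace.go old new fuel l acc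
        = acc.reverse ++ PySem.Chars.replace.go old new fuel l [] := by
  intro fuel
  induction fuel with
  | zero => intro l acc; simp [PySem.Chars.replace.go]
  | succ f ih =>
    intro l acc
    cases l with
    | nil => simp [PySem.Chars.replace.go]
    | cons c t =>
      rw [show PySem.Chars.replace.go old new (f+1) (c::t) acc
          = if old.isPrefixOf (c::t) = true then
              PySem.Chars.replace.go old new f (List.drop old.length (c::t)) (new.reverse ++ acc)
            else PySem.Chars.replace.go old new f t (c :: acc) from rfl]
      rw [show PySem.Chars.replace.go old new (f+1) (c::t) []
          = if old.isPrefixOf (c::t) = true then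
              PySem.Chars.replace.go old new f (List.drop old.length (c::t)) (new.reverse ++ [])
            else PySem.Chars.replace.go old new f t (c :: []) from rfl]
      split_ifs with hp
      · rw [ih _ (new.reverse ++ acc), ih _ (new.reverse ++ [])]; simp
      · rw [ih _ (c :: acc), ih _ [c]]; simp

theorem go_fuel (old new : List Char) (h : old ≠ []) :
    ∀ (fuel : Nat) (l : List Char), l.length ≤ fuel →
      PySem.Chars.replace.go old new fuel l []
        = PySem.Chars.replace.go old new l.length l [] := by
  intro fuel
  induction fuel using Nat.strong_induction_on with
  | _ f ih =>
    intro l hl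
    match f, l with
    | 0, l =>
      have : l = [] := by cases l <;> simp_all
      subst this; rfl
    | (f+1), [] => simp [PySem.Chars.replace.go]
    | (f+1), (c::t) =>
      have hold : 1 ≤ old.length := by cases old <;> simp_all
      have hlt : t.length ≤ f := by simp at hl; omega
      have hd : (List.drop old.length t).length ≤ t.length := by simp
      rw [show PySem.Chars.replace.go old new (f+1) (c::t) []
          = if old.isPrefixOf (c::t) = true then
              PySem.Chars.replace.go old new f (List.drop old.length (c::t)) (new.reverse ++ [])
            else PySem.Chars.replace.go old new f t (c :: []) from rfl]
      rw [show PySem.Chars.replace.go old new (c::t).length (c::t) []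
          = if old.isPrefixOf (c::t) = true then
              PySem.Chars.replace.go old new t.length (List.drop old.length (c::t)) (new.reverse ++ [])
            else PySem.Chars.replace.go old new t.length t (c :: []) from rfl]
      have hdrop : (List.drop old.length (c::t)).length ≤ t.length := by
        simp; omega
      split_ifs with hp
      · rw [go_acc, go_acc (acc := new.reverse ++ [])]
        rw [ih f (by omega) _ (hdrop.trans hlt),
            ih t.length (by omega) _ hdrop]
      · rw [go_acc (acc := [c]), go_acc (acc := [c])]
        rw [ih f (by omega) _ hlt, ih t.length (by omega) _ (le_refl _)]

theorem replace_nil (old new : List Char) (h : old ≠ []) :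
    PySem.Chars.replace [] old new = [] := by
  have : old.isEmpty = false := by cases old <;> simp_all
  simp [PySem.Chars.replace, this, PySem.Chars.replace.go]

theorem replace_cons (old new : List Char) (h : old ≠ []) (c : Char) (t : List Char) :
    PySem.Chars.replace (c :: t) old new
      = if List.isPrefixOf old (c :: t) then
          new ++ PySem.Chars.replace (List.drop old.length (c :: t)) old new
        else c :: PySem.Chars.replace t old new := by
  have he : old.isEmpty = false := by cases old <;> simp_all
  have hold : 1 ≤ old.length := by cases old <;> simp_all
  simp only [PySem.Chars.replace, he, Bool.false_eq_true, if_false, List.length_cons]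
  rw [show PySem.Chars.replace.go old new (t.length+1) (c::t) []
      = if old.isPrefixOf (c::t) = true then
          PySem.Chars.replace.go old new t.length (List.drop old.length (c::t)) (new.reverse ++ [])
        else PySem.Chars.replace.go old new t.length t (c :: []) from rfl]
  have hdrop : (List.drop old.length (c::t)).length ≤ t.length := by simp; omega
  split_ifs with hp
  · rw [go_acc, go_fuel old new h _ _ hdrop]; simp
  · rw [go_acc]; simp

theorem replace_bar_eq_filter (l : List Char) :
    PySem.Chars.replace l ['|'] [] = l.filter (fun c => c != '|') := by
  induction l with
  | nil => simp [replace_nil]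
  | cons c t ih =>
    rw [replace_cons _ _ (by simp)]
    by_cases hc : c = '|'
    · subst hc; simp [List.isPrefixOf, ih]
    · simp [List.isPrefixOf, hc, Ne.symm hc, ih]

theorem f2_cons_ne (c : Char) (t : List Char) (h : c ≠ 'p') :
    PySem.Chars.replace (c :: t) ['p','a','t','e','s'] ['p','â','t','e','s']
      = c :: PySem.Chars.replace t ['p','a','t','e','s'] ['p','â','t','e','s'] := by
  rw [replace_cons _ _ (by simp)]
  simp only [List.isPrefixOf]
  simp [Ne.symm h]

theorem f3_cons_ne (c : Char) (t : List Char) (h : c ≠ 'P') :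
    PySem.Chars.replace (c :: t) ['P','A','T','E','S'] ['P','Â','T','E','S']
      = c :: PySem.Chars.replace t ['P','A','T','E','S'] ['P','Â','T','E','S'] := by
  rw [replace_cons _ _ (by simp)]
  simp only [List.isPrefixOf]
  simp [Ne.symm h]

theorem chainS (t : List Char)
    (h : List.isPrefixOf ['S'] (PySem.Chars.replace t ['p','a','t','e','s'] ['p','â','t','e','s'])) :
    List.isPrefixOf ['S'] t := by
  cases t with
  | nil => rw [replace_nil _ _ (by simp)] at h; simp [List.isPrefixOf] at h
  | cons c r =>
    rw [replace_cons _ _ (by simp)] at h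
    split_ifs at h with hp
    · simp [List.isPrefixOf] at h
    · simp [List.isPrefixOf] at h ⊢
      exact h

theorem chainES (t : List Char)
    (h : List.isPrefixOf ['E','S'] (PySem.Chars.replace t ['p','a','t','e','s'] ['p','â','t','e','s'])) :
    List.isPrefixOf ['E','S'] t := by
  cases t with
  | nil => rw [replace_nil _ _ (by simp)] at h; simp [List.isPrefixOf] at h
  | cons c r =>
    rw [replace_cons _ _ (by simp)] at h
    split_ifs at h with hp
    · simp [List.isPrefixOf] at h
    · simp only [List.isPrefixOf] at h ⊢
      simp at h ⊢
      exact ⟨h.1, by have := chainS r (by simp [List.isPrefixOf, h.2]); simpa [List.isPrefixOf] using this⟩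

theorem chainTES (t : List Char)
    (h : List.isPrefixOf ['T','E','S'] (PySem.Chars.replace t ['p','a','t','e','s'] ['p','â','t','e','s'])) :
    List.isPrefixOf ['T','E','S'] t := by
  cases t with
  | nil => rw [replace_nil _ _ (by simp)] at h; simp [List.isPrefixOf] at h
  | cons c r =>
    rw [replace_cons _ _ (by simp)] at h
    split_ifs at h with hp
    · simp [List.isPrefixOf] at h
    · simp only [List.isPrefixOf] at h ⊢
      simp at h ⊢
      exact ⟨h.1, by have := chainES r (by simp [List.isPrefixOf, h.2]); simpa [List.isPrefixOf] using this⟩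

theorem chainATES (t : List Char)
    (h : List.isPrefixOf ['A','T','E','S'] (PySem.Chars.replace t ['p','a','t','e','s'] ['p','â','t','e','s'])) :
    List.isPrefixOf ['A','T','E','S'] t := by
  cases t with
  | nil => rw [replace_nil _ _ (by simp)] at h; simp [List.isPrefixOf] at h
  | cons c r =>
    rw [replace_cons _ _ (by simp)] at h
    split_ifs at h with hp
    · simp [List.isPrefixOf] at h
    · simp only [List.isPrefixOf] at h ⊢
      simp at h ⊢
      exact ⟨h.1, by have := chainTES r (by simp [List.isPrefixOf, h.2]); simpa [List.isPrefixOf] using this⟩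

theorem two_passes_eq_scan (l : List Char) :
    PySem.Chars.replace (PySem.Chars.replace l ['p','a','t','e','s'] ['p','â','t','e','s'])
        ['P','A','T','E','S'] ['P','Â','T','E','S']
      = cleanScanB l := by
  induction l using cleanScanB.induct with
  | case1 =>
    rw [replace_nil _ _ (by simp), replace_nil _ _ (by simp), cleanScanB]
  | case2 c t hp ih =>
    obtain ⟨u, hu⟩ := List.isPrefixOf_iff_prefix.mp hp
    simp only [List.cons_append, List.nil_append, List.cons.injEq] at hu
    obtain ⟨rfl, rfl⟩ := hu
    try simp only [List.nil_append] at hp ih ⊢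
    have ihu : PySem.Chars.replace (PySem.Chars.replace u ['p','a','t','e','s'] ['p','â','t','e','s'])
        ['P','A','T','E','S'] ['P','Â','T','E','S'] = cleanScanB u := by
      simpa using ih
    rw [replace_cons _ _ (by simp), if_pos hp]
    rw [show List.drop (['p','a','t','e','s'] : List Char).length ('p'::'a'::'t'::'e'::'s'::u) = u from rfl]
    rw [show (['p','â','t','e','s'] ++ PySem.Chars.replace u ['p','a','t','e','s'] ['p','â','t','e','s'])
        = 'p'::'â'::'t'::'e'::'s':: PySem.Chars.replace u ['p','a','t','e','s'] ['p','â','t','e','s'] from rfl]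
    rw [f3_cons_ne _ _ (by decide), f3_cons_ne _ _ (by decide), f3_cons_ne _ _ (by decide),
        f3_cons_ne _ _ (by decide), f3_cons_ne _ _ (by decide), ihu]
    rw [cleanScanB, if_pos hp]
    rw [show List.drop 4 ('a'::'t'::'e'::'s'::u) = u from rfl]
  | case3 c t hp hp2 ih =>
    obtain ⟨u, hu⟩ := List.isPrefixOf_iff_prefix.mp hp2
    simp only [List.cons_append, List.nil_append, List.cons.injEq] at hu
    obtain ⟨rfl, rfl⟩ := hu
    try simp only [List.nil_append] at hp hp2 ih ⊢
    have ihu : PySem.Chars.replace (PySem.Chars.replace u ['p','a','t','e','s'] ['p','â','t','e','s'])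
        ['P','A','T','E','S'] ['P','Â','T','E','S'] = cleanScanB u := by
      simpa using ih
    rw [f2_cons_ne _ _ (by decide), f2_cons_ne _ _ (by decide), f2_cons_ne _ _ (by decide),
        f2_cons_ne _ _ (by decide), f2_cons_ne _ _ (by decide)]
    rw [replace_cons _ _ (by simp), if_pos (by simp [List.isPrefixOf])]
    rw [show List.drop (['P','A','T','E','S'] : List Char).length
          ('P'::'A'::'T'::'E'::'S'::PySem.Chars.replace u ['p','a','t','e','s'] ['p','â','t','e','s'])
        = PySem.Chars.replace u ['p','a','t','e','s'] ['p','â','t','e','s'] from rfl]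
    rw [ihu, cleanScanB, if_neg (by simpa using hp), if_pos hp2]
    rw [show List.drop 4 ('A'::'T'::'E'::'S'::u) = u from rfl]
    rfl
  | case4 c t hp hp2 ih =>
    rw [replace_cons _ _ (by simp), if_neg (by simpa using hp)]
    have hno : ¬ List.isPrefixOf ['P','A','T','E','S']
        (c :: PySem.Chars.replace t ['p','a','t','e','s'] ['p','â','t','e','s']) = true := by
      intro hcon
      simp only [List.isPrefixOf] at hcon
      simp at hcon
      apply hp2
      have hA := chainATES t (by simp [List.isPrefixOf, hcon.2])
      simp [List.isPrefixOf]
      exact ⟨hcon.1, by simpa [List.isPrefixOf] using hA⟩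
    rw [replace_cons _ _ (by simp), if_neg hno]
    rw [cleanScanB, if_neg (by simpa using hp), if_neg (by simpa using hp2)]
    rw [ih]

-- A's loop over the dict items is exactly the three replaces in insertion order.
theorem clean_recipe_unfold (r : String) :
    clean_recipe r
      = PySem.Str.replace (PySem.Str.replace (PySem.Str.replace r "|" "") "pates" "pâtes")
          "PATES" "PÂTES" := rfl

-- ===== VERDICT (by name: the statement is the Claim_ definition above) =====
theorem clean_recipe_spec : Claim_equal_clean_recipe := by
  intro recipe _
  unfold Spec_clean_recipe
  rw [clean_recipe_unfold, ← String.toList_inj]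
  simp [PySem.Str.toList_replace, clean_recipe_alt]
  rw [replace_bar_eq_filter]
  exact two_passes_eq_scan _
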